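-- pv_equiv track=rewrite | github.com/olsenw/LeetCodeExercises | Python3/take_k_of_each_character_from_left_and_right.py | takeCharacters_brute
-- ===== SOURCE A (Python) =====
-- def takeCharacters_brute(s: str, k: int) -> int:
--     if k == 0:
--         return 0
--     a,b,c = 0,0,0
--     for i in s:
--         if i == 'a':
--             a += 1
--         elif i == 'b':
--             b += 1
--         else:
--             c += 1
--     if a < k or b < k or c < k:
--         return -1
--     answer = len(s)
--     a,b,c = 0,0,0
--     for j in range(len(s)-1,0,-1):
--         if s[j] == 'a':
--             a += 1
--         elif s[j] == 'b':
--             b += 1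
--         else:
--             c += 1
--         x,y,z = a,b,c
--         for i in range(j):
--             if s[i] == 'a':
--                 x += 1
--             elif s[i] == 'b':
--                 y += 1
--             else:
--                 z += 1
--             if x >= k and y >= k and z >= k:
--                 answer = min(answer, i + 1 + len(s) - j)
--                 break
--     return answer
-- ===== SOURCE B (Python) =====
-- def takeCharacters_brute(s: str, k: int) -> int:
--     if k <= 0:
--         return 0
--     total = {'a': 0, 'b': 0, 'c': 0}
--     for ch in s:
--         total[ch if ch in ('a', 'b') else 'c'] += 1
--     if total['a'] < k or total['b'] < k or total['c'] < k:
--         return -1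
--     # longest removable middle window: outside the window >= k of each kind
--     win = {'a': 0, 'b': 0, 'c': 0}
--     best = 0
--     left = 0
--     for right in range(len(s)):
--         ch = s[right]
--         win[ch if ch in ('a', 'b') else 'c'] += 1
--         while (total['a'] - win['a'] < k or total['b'] - win['b'] < k
--                or total['c'] - win['c'] < k):
--             lc = s[left]
--             win[lc if lc in ('a', 'b') else 'c'] -= 1
--             left += 1
--         best = max(best, right - left + 1)
--     return len(s) - best
-- ===== Notes on version B (the rewrite author's own statement) =====
-- stated objective: alternative
-- what changed: Replaced the per-suffix rescan of every prefix (nested loops with break) by the classic one-pass sliding window over the longest removable middle window, and B also considers solutions that take characters from only one end, which A's loop bounds skip.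
-- intended difference: On feasible inputs with k >= 1 where every cheapest solution takes characters from at most one end of the string (and is shorter than the whole string), A returns a strictly larger value (its loops only try splits taking at least one character from BOTH ends, e.g. 'abca', k=1: A returns 4) while B returns the true minimum (3), which is the intended answer to the problem. — e.g. on takeCharacters_brute("abca", 1): A returns 4, B returns 3
-- outside the precondition, e.g. on takeCharacters_brute('a', -1): A returns 1, B returns 0
import Mathlib
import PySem

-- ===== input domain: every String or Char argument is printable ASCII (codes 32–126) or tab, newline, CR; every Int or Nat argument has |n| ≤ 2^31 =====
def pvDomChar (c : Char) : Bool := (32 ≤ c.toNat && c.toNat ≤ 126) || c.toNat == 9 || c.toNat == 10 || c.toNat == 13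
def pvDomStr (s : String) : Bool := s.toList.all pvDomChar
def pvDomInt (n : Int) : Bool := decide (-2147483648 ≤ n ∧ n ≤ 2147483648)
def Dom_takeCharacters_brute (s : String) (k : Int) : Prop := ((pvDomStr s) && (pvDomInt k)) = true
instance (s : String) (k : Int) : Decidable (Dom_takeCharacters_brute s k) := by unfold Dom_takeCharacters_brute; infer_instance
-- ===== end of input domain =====

-- B replaces A's per-suffix rescan of every prefix by a one-pass sliding window over the
-- longest removable middle window; B also returns the true minimum on the corner inputs
-- where the best solution takes characters from only one end (see D_ below).

-- ===== PORT A =====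
-- first counting pass: 'for i in s: if i == "a": a += 1 elif … else …'
def pvCountABC (cs : List Char) : Int × Int × Int :=
  cs.foldl (fun (t : Int × Int × Int) i =>
    if i = 'a' then (t.1 + 1, t.2.1, t.2.2)
    else if i = 'b' then (t.1, t.2.1 + 1, t.2.2)
    else (t.1, t.2.1, t.2.2 + 1)) (0, 0, 0)

-- inner 'for i in range(j): … if x >= k and y >= k and z >= k: answer = min(answer, i+1+len(s)-j); break'
def pvInnerA (cs : List Char) (k : Int) (n j : Nat) :
    List Nat → Int → Int → Int → Int → Int
  | [], _, _, _, answer => answer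
  | i :: rest, x, y, z, answer =>
    let ch := cs.getD i ' '
    let xyz := if ch = 'a' then (x + 1, y, z)
               else if ch = 'b' then (x, y + 1, z)
               else (x, y, z + 1)
    if k ≤ xyz.1 ∧ k ≤ xyz.2.1 ∧ k ≤ xyz.2.2 then
      min answer ((i : Int) + 1 + (n : Int) - (j : Int))
    else
      pvInnerA cs k n j rest xyz.1 xyz.2.1 xyz.2.2 answer

-- outer 'for j in range(len(s)-1, 0, -1): …' (the list argument is [n-1, …, 1])
def pvOuterA (cs : List Char) (k : Int) (n : Nat) :
    List Nat → Int → Int → Int → Int → Int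
  | [], _, _, _, answer => answer
  | j :: rest, a, b, c, answer =>
    let ch := cs.getD j ' '
    let abc := if ch = 'a' then (a + 1, b, c)
               else if ch = 'b' then (a, b + 1, c)
               else (a, b, c + 1)
    let answer' := pvInnerA cs k n j (List.range j) abc.1 abc.2.1 abc.2.2 answer
    pvOuterA cs k n rest abc.1 abc.2.1 abc.2.2 answer'

def takeCharacters_brute (s : String) (k : Int) : Int :=
  if k = 0 then 0
  else
    let cs := s.toList
    let abc := pvCountABC cs
    if abc.1 < k ∨ abc.2.1 < k ∨ abc.2.2 < k then -1
    else
      let n := cs.length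
      pvOuterA cs k n ((List.range' 1 (n - 1)).reverse) 0 0 0 (n : Int)

-- ===== PORT B =====
-- totals pass: "total[ch if ch in ('a','b') else 'c'] += 1" (the dict's three cells as a triple)
def pvTotB (cs : List Char) : Int × Int × Int :=
  cs.foldl (fun (t : Int × Int × Int) ch =>
    let key := if ch = 'a' ∨ ch = 'b' then ch else 'c'
    if key = 'a' then (t.1 + 1, t.2.1, t.2.2)
    else if key = 'b' then (t.1, t.2.1 + 1, t.2.2)
    else (t.1, t.2.1, t.2.2 + 1)) (0, 0, 0)

-- the 'while total[..] - win[..] < k: … left += 1' loop; the list 'win' is the window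
-- s[left:right+1], so advancing 'left' is popping the head of 'win'
def pvShrinkB (k ta tb tc : Int) :
    List Char → Int → Int → Int → List Char × Int × Int × Int
  | [], wa, wb, wc => ([], wa, wb, wc)
  | lc :: rest, wa, wb, wc =>
    if ta - wa < k ∨ tb - wb < k ∨ tc - wc < k then
      let w := if lc = 'a' then (wa - 1, wb, wc)
               else if lc = 'b' then (wa, wb - 1, wc)
               else (wa, wb, wc - 1)
      pvShrinkB k ta tb tc rest w.1 w.2.1 w.2.2
    else (lc :: rest, wa, wb, wc)

-- the 'for right in range(len(s))' loop; 'win' is s[left:right+1] as a list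
def pvLoopB (k ta tb tc : Int) :
    List Char → List Char → Int → Int → Int → Int → Int
  | [], _, _, _, _, best => best
  | ch :: rest, win, wa, wb, wc, best =>
    let win₁ := win ++ [ch]
    let w₁ := if ch = 'a' then (wa + 1, wb, wc)
              else if ch = 'b' then (wa, wb + 1, wc)
              else (wa, wb, wc + 1)
    let st := pvShrinkB k ta tb tc win₁ w₁.1 w₁.2.1 w₁.2.2
    pvLoopB k ta tb tc rest st.1 st.2.1 st.2.2.1 st.2.2.2
      (max best (st.1.length : Int))

def takeCharacters_brute_alt (s : String) (k : Int) : Int :=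
  if k ≤ 0 then 0
  else
    let cs := s.toList
    let t := pvTotB cs
    if t.1 < k ∨ t.2.1 < k ∨ t.2.2 < k then -1
    else (cs.length : Int) - pvLoopB k t.1 t.2.1 t.2.2 cs [] 0 0 0 0

-- ===== PRECONDITION & SPEC =====
-- Pre_ excludes negative k, which is outside the problem's natural domain (a count of
-- characters to take); there A's leftover loop state yields an accidental value (e.g. 1 on
-- ("a", -1)) while B naturally returns 0 (taking nothing already gives ≥ k of each).
def Pre_takeCharacters_brute (s : String) (k : Int) : Prop := 0 ≤ k
instance (s : String) (k : Int) : Decidable (Pre_takeCharacters_brute s k) := by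
  unfold Pre_takeCharacters_brute; infer_instance

def pvWitness_takeCharacters_brute : String × Int := ("abcabc", 1)

-- spec-layer counts (used by D_): number of 'a', of 'b', of other characters
def pvCntA (l : List Char) : Int := (l.countP (fun ch => ch = 'a') : Int)
def pvCntB (l : List Char) : Int := (l.countP (fun ch => ch = 'b') : Int)
def pvCntC (l : List Char) : Int := (l.countP (fun ch => ¬ ch = 'a' ∧ ¬ ch = 'b') : Int)

-- the characters outside the middle window cs[x:y] supply ≥ k of each kind
def pvValid (cs : List Char) (k : Int) (x y : Nat) : Prop :=
  k ≤ pvCntA (cs.take x) + pvCntA (cs.drop y) ∧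
  k ≤ pvCntB (cs.take x) + pvCntB (cs.drop y) ∧
  k ≤ pvCntC (cs.take x) + pvCntC (cs.drop y)

-- taking l characters from the left and r from the right is a feasible solution
def pvOk (cs : List Char) (k : Int) (l r : Nat) : Prop :=
  l + r ≤ cs.length ∧ pvValid cs k l (cs.length - r)

-- On feasible inputs with k ≥ 1 where every cheapest solution takes characters from at most
-- one end (and is shorter than the whole string), A returns a strictly larger value — its
-- loops only try splits taking ≥ 1 character from BOTH ends — while B returns the true
-- minimum, the intended answer (e.g. "abca", k = 1: A returns 4, B returns 3).
def D_takeCharacters_brute (s : String) (k : Int) : Prop :=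
  1 ≤ k ∧ k ≤ pvCntA s.toList ∧ k ≤ pvCntB s.toList ∧ k ≤ pvCntC s.toList ∧
  ∃ c < s.toList.length,
    (pvOk s.toList k c 0 ∨ pvOk s.toList k 0 c) ∧
    ∀ l < c, ∀ r < c, ¬ (1 ≤ l ∧ 1 ≤ r ∧ l + r ≤ c ∧ pvOk s.toList k l r)
instance (s : String) (k : Int) : Decidable (D_takeCharacters_brute s k) := by
  unfold D_takeCharacters_brute pvOk pvValid; infer_instance

def Spec_takeCharacters_brute (s : String) (k : Int) (out : Int) : Prop :=
  ¬ D_takeCharacters_brute s k → out = takeCharacters_brute_alt s k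
instance (s : String) (k : Int) (out : Int) : Decidable (Spec_takeCharacters_brute s k out) := by
  unfold Spec_takeCharacters_brute; infer_instance

def pvDiffWitness_takeCharacters_brute : String × Int := ("abca", 1)
def pvDiffWitnessOut_takeCharacters_brute : Int × Int := (4, 3)

-- ===== CLAIM (what is proved, stated in full; the proofs are below) =====
def Claim_unchanged_takeCharacters_brute : Prop :=
  ∀ (s : String) (k : Int), Dom_takeCharacters_brute s k → Pre_takeCharacters_brute s k →
    Spec_takeCharacters_brute s k (takeCharacters_brute s k)
def Claim_changed_takeCharacters_brute : Prop :=
  Dom_takeCharacters_brute (pvDiffWitness_takeCharacters_brute.1) (pvDiffWitness_takeCharacters_brute.2) ∧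
  Pre_takeCharacters_brute (pvDiffWitness_takeCharacters_brute.1) (pvDiffWitness_takeCharacters_brute.2) ∧
  D_takeCharacters_brute (pvDiffWitness_takeCharacters_brute.1) (pvDiffWitness_takeCharacters_brute.2) ∧
  takeCharacters_brute (pvDiffWitness_takeCharacters_brute.1) (pvDiffWitness_takeCharacters_brute.2) = pvDiffWitnessOut_takeCharacters_brute.1 ∧
  takeCharacters_brute_alt (pvDiffWitness_takeCharacters_brute.1) (pvDiffWitness_takeCharacters_brute.2) = pvDiffWitnessOut_takeCharacters_brute.2 ∧
  pvDiffWitnessOut_takeCharacters_brute.1 ≠ pvDiffWitnessOut_takeCharacters_brute.2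
def Claim_exact_takeCharacters_brute : Prop :=
  ∀ (s : String) (k : Int), Dom_takeCharacters_brute s k → Pre_takeCharacters_brute s k →
    D_takeCharacters_brute s k → takeCharacters_brute s k ≠ takeCharacters_brute_alt s k

-- ===== LEMMAS AND PROOFS =====

-- counts of a list split as take/drop
theorem pv_cnt_take_drop (p : Char → Bool) (cs : List Char) (i : Nat) :
    cs.countP p = (cs.take i).countP p + (cs.drop i).countP p := by
  conv_lhs => rw [← List.take_append_drop i cs]
  rw [List.countP_append]

-- the shared counting fold computes the three spec counts
theorem pv_fold_counts (cs : List Char) (a b c : Int) :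
    cs.foldl (fun (t : Int × Int × Int) i =>
      if i = 'a' then (t.1 + 1, t.2.1, t.2.2)
      else if i = 'b' then (t.1, t.2.1 + 1, t.2.2)
      else (t.1, t.2.1, t.2.2 + 1)) (a, b, c)
    = (a + pvCntA cs, b + pvCntB cs, c + pvCntC cs) := by
  induction cs generalizing a b c with
  | nil => simp [pvCntA, pvCntB, pvCntC]
  | cons ch tl ih =>
    simp only [List.foldl_cons]
    by_cases ha : ch = 'a'
    · simp [ha, ih, pvCntA, pvCntB, pvCntC, List.countP_cons]
      push_cast
      omega
    · by_cases hb : ch = 'b'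
      · simp [ha, hb, ih, pvCntA, pvCntB, pvCntC, List.countP_cons]
        push_cast
        omega
      · simp [ha, hb, ih, pvCntA, pvCntB, pvCntC, List.countP_cons]
        push_cast
        omega

theorem pv_countABC_eq (cs : List Char) :
    pvCountABC cs = (pvCntA cs, pvCntB cs, pvCntC cs) := by
  unfold pvCountABC; rw [pv_fold_counts]; simp

theorem pv_totB_eq (cs : List Char) :
    pvTotB cs = (pvCntA cs, pvCntB cs, pvCntC cs) := by
  have hfun : (fun (t : Int × Int × Int) ch =>
      let key := if ch = 'a' ∨ ch = 'b' then ch else 'c'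
      if key = 'a' then (t.1 + 1, t.2.1, t.2.2)
      else if key = 'b' then (t.1, t.2.1 + 1, t.2.2)
      else (t.1, t.2.1, t.2.2 + 1))
      = (fun (t : Int × Int × Int) i =>
      if i = 'a' then (t.1 + 1, t.2.1, t.2.2)
      else if i = 'b' then (t.1, t.2.1 + 1, t.2.2)
      else (t.1, t.2.1, t.2.2 + 1)) := by
    funext t ch
    by_cases h1 : ch = 'a' <;> by_cases h2 : ch = 'b' <;> simp [h1, h2]
  unfold pvTotB
  rw [hfun, pv_fold_counts]
  simp

-- monotonicity of validity
theorem pv_valid_anti_y (cs : List Char) (k : Int) {x y y' : Nat} (h : y ≤ y')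
    (hv : pvValid cs k x y') : pvValid cs k x y := by
  obtain ⟨h1, h2, h3⟩ := hv
  have hsub : List.Sublist (cs.drop y') (cs.drop y) := by
    have hy : cs.drop y' = (cs.drop y).drop (y' - y) := by
      rw [List.drop_drop]; congr 1; omega
    rw [hy]; exact List.drop_sublist _ _
  have key : ∀ p : Char → Bool, (cs.drop y').countP p ≤ (cs.drop y).countP p :=
    fun p => hsub.countP_le
  refine ⟨?_, ?_, ?_⟩ <;> unfold pvCntA pvCntB pvCntC at * <;>
    [exact le_trans h1 (by have := key (fun ch => ch = 'a'); push_cast; omega);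
     exact le_trans h2 (by have := key (fun ch => ch = 'b'); push_cast; omega);
     exact le_trans h3 (by have := key (fun ch => ¬ ch = 'a' ∧ ¬ ch = 'b'); push_cast; omega)]

-- feasibility makes the empty window valid
theorem pv_valid_refl (cs : List Char) (k : Int) (r : Nat)
    (hf : k ≤ pvCntA cs ∧ k ≤ pvCntB cs ∧ k ≤ pvCntC cs) : pvValid cs k r r := by
  obtain ⟨h1, h2, h3⟩ := hf
  refine ⟨?_, ?_, ?_⟩ <;> unfold pvCntA pvCntB pvCntC at * <;>
    [have := pv_cnt_take_drop (fun ch => ch = 'a') cs r;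
     have := pv_cnt_take_drop (fun ch => ch = 'b') cs r;
     have := pv_cnt_take_drop (fun ch => ¬ ch = 'a' ∧ ¬ ch = 'b') cs r] <;>
    push_cast at * <;> omega

-- counts of an appended/consed character
theorem pv_cnt_append (l1 l2 : List Char) :
    pvCntA (l1 ++ l2) = pvCntA l1 + pvCntA l2 ∧
    pvCntB (l1 ++ l2) = pvCntB l1 + pvCntB l2 ∧
    pvCntC (l1 ++ l2) = pvCntC l1 + pvCntC l2 := by
  unfold pvCntA pvCntB pvCntC
  refine ⟨?_, ?_, ?_⟩ <;> rw [List.countP_append] <;> push_cast <;> ring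

theorem pv_cnt_single (ch : Char) :
    pvCntA [ch] = (if ch = 'a' then 1 else 0) ∧
    pvCntB [ch] = (if ch = 'b' then 1 else 0) ∧
    pvCntC [ch] = (if ¬ ch = 'a' ∧ ¬ ch = 'b' then 1 else 0) := by
  unfold pvCntA pvCntB pvCntC
  by_cases ha : ch = 'a' <;> by_cases hb : ch = 'b' <;>
    simp [ha, hb, List.countP_cons]

-- the shared one-character triple update, prefix form: counts of (pre ++ [ch]) + counts of suf
theorem pv_step_counts (ch : Char) (x y z : Int) (pre suf : List Char)
    (hx : x = pvCntA pre + pvCntA suf) (hy : y = pvCntB pre + pvCntB suf)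
    (hz : z = pvCntC pre + pvCntC suf) :
    (if ch = 'a' then (x + 1, y, z)
     else if ch = 'b' then (x, y + 1, z)
     else (x, y, z + 1) : Int × Int × Int)
    = (pvCntA (pre ++ [ch]) + pvCntA suf, pvCntB (pre ++ [ch]) + pvCntB suf,
       pvCntC (pre ++ [ch]) + pvCntC suf) := by
  obtain ⟨e1, e2, e3⟩ := pv_cnt_append pre [ch]
  obtain ⟨s1, s2, s3⟩ := pv_cnt_single ch
  subst hx hy hz
  by_cases ha : ch = 'a' <;> by_cases hb : ch = 'b' <;>
    simp_all [Prod.ext_iff] <;> omega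

-- the shared one-character triple update, cons form
theorem pv_step_counts_cons (ch : Char) (a b c : Int) (suf : List Char)
    (ha : a = pvCntA suf) (hb : b = pvCntB suf) (hc : c = pvCntC suf) :
    (if ch = 'a' then (a + 1, b, c)
     else if ch = 'b' then (a, b + 1, c)
     else (a, b, c + 1) : Int × Int × Int)
    = (pvCntA (ch :: suf), pvCntB (ch :: suf), pvCntC (ch :: suf)) := by
  subst ha hb hc
  unfold pvCntA pvCntB pvCntC
  by_cases h1 : ch = 'a' <;> by_cases h2 : ch = 'b' <;>
    simp_all [Prod.ext_iff, List.countP_cons] <;> omega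

theorem pv_take_succ_eq (cs : List Char) (i : Nat) (h : i < cs.length) :
    cs.take (i + 1) = cs.take i ++ [cs[i]] := by
  rw [List.take_succ, List.getElem?_eq_getElem h]
  rfl

theorem pv_drop_eq_cons (cs : List Char) (j : Nat) (h : j < cs.length) :
    cs.drop j = cs[j] :: cs.drop (j + 1) :=
  List.drop_eq_getElem_cons h

theorem pv_getD_eq (cs : List Char) (i : Nat) (h : i < cs.length) :
    cs.getD i ' ' = cs[i] := by
  rw [List.getD_eq_getElem?_getD, List.getElem?_eq_getElem h]
  rfl

theorem pv_inner_post (cs : List Char) (k : Int) (n j : Nat) :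
    ∀ (m i : Nat) (x y z answer : Int),
      i + m = j → j < n → n = cs.length →
      x = pvCntA (cs.take i) + pvCntA (cs.drop j) →
      y = pvCntB (cs.take i) + pvCntB (cs.drop j) →
      z = pvCntC (cs.take i) + pvCntC (cs.drop j) →
      (pvInnerA cs k n j (List.range' i m) x y z answer ≤ answer) ∧
      (∀ l, i < l → l ≤ j → pvValid cs k l j →
        pvInnerA cs k n j (List.range' i m) x y z answer ≤ (l : Int) + (n : Int) - (j : Int)) ∧
      (pvInnerA cs k n j (List.range' i m) x y z answer = answer ∨
        ∃ l, i < l ∧ l ≤ j ∧ pvValid cs k l j ∧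
          pvInnerA cs k n j (List.range' i m) x y z answer = (l : Int) + (n : Int) - (j : Int)) := by
  intro m
  induction m with
  | zero =>
    intro i x y z answer h1 hj hn hx hy hz
    refine ⟨?_, ?_, ?_⟩
    · exact le_refl _
    · intro l hil hlj _
      omega
    · exact Or.inl rfl
  | succ m ih =>
    intro i x y z answer h1 hj hn hx hy hz
    have hi : i < cs.length := by omega
    rw [List.range'_succ]
    simp only [pvInnerA]
    rw [pv_getD_eq cs i hi]
    have hstep := pv_step_counts cs[i] x y z (cs.take i) (cs.drop j) hx hy hz
    rw [← pv_take_succ_eq cs i hi] at hstep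
    rw [hstep]
    by_cases hcond : k ≤ pvCntA (cs.take (i + 1)) + pvCntA (cs.drop j) ∧
        k ≤ pvCntB (cs.take (i + 1)) + pvCntB (cs.drop j) ∧
        k ≤ pvCntC (cs.take (i + 1)) + pvCntC (cs.drop j)
    · rw [if_pos hcond]
      have hvalid : pvValid cs k (i + 1) j := hcond
      refine ⟨min_le_left _ _, ?_, ?_⟩
      · intro l hil hlj _
        have : ((i : Int) + 1 + (n : Int) - (j : Int)) ≤ (l : Int) + (n : Int) - (j : Int) := by
          have : (i : Int) + 1 ≤ (l : Int) := by exact_mod_cast hil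
          omega
        exact le_trans (min_le_right _ _) this
      · rcases le_total answer ((i : Int) + 1 + (n : Int) - (j : Int)) with hle | hle
        · exact Or.inl (min_eq_left hle)
        · refine Or.inr ⟨i + 1, by omega, by omega, hvalid, ?_⟩
          rw [min_eq_right hle]
          push_cast
          ring
    · rw [if_neg hcond]
      obtain ⟨ih1, ih2, ih3⟩ := ih (i + 1)
        (pvCntA (cs.take (i + 1)) + pvCntA (cs.drop j))
        (pvCntB (cs.take (i + 1)) + pvCntB (cs.drop j))
        (pvCntC (cs.take (i + 1)) + pvCntC (cs.drop j)) answer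
        (by omega) hj hn rfl rfl rfl
      refine ⟨ih1, ?_, ?_⟩
      · intro l hil hlj hv
        rcases Nat.lt_or_ge (i + 1) l with hl | hl
        · exact ih2 l hl hlj hv
        · have : l = i + 1 := by omega
          subst this
          exact absurd hv hcond
      · rcases ih3 with h | ⟨l, hl1, hl2, hl3, hl4⟩
        · exact Or.inl h
        · exact Or.inr ⟨l, by omega, hl2, hl3, hl4⟩

theorem pv_outer_post (cs : List Char) (k : Int) (n : Nat) (hn : n = cs.length) :
    ∀ (j₀ : Nat) (a b c answer : Int),
      j₀ + 1 ≤ n →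
      a = pvCntA (cs.drop (j₀ + 1)) → b = pvCntB (cs.drop (j₀ + 1)) →
      c = pvCntC (cs.drop (j₀ + 1)) →
      (pvOuterA cs k n ((List.range' 1 j₀).reverse) a b c answer ≤ answer) ∧
      (∀ l j, 1 ≤ j → j ≤ j₀ → 1 ≤ l → l ≤ j → pvValid cs k l j →
        pvOuterA cs k n ((List.range' 1 j₀).reverse) a b c answer ≤ (l : Int) + (n : Int) - (j : Int)) ∧
      (pvOuterA cs k n ((List.range' 1 j₀).reverse) a b c answer = answer ∨
        ∃ l j, 1 ≤ j ∧ j ≤ j₀ ∧ 1 ≤ l ∧ l ≤ j ∧ pvValid cs k l j ∧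
          pvOuterA cs k n ((List.range' 1 j₀).reverse) a b c answer = (l : Int) + (n : Int) - (j : Int)) := by
  intro j₀
  induction j₀ with
  | zero =>
    intro a b c answer hj₀ ha hb hc
    refine ⟨le_refl _, ?_, Or.inl rfl⟩
    intro l j hj1 hj2 _ _ _
    omega
  | succ j₀ ih =>
    intro a b c answer hj₀ ha hb hc
    have hjn : j₀ + 1 < n := by omega
    have hjcs : j₀ + 1 < cs.length := by omega
    rw [List.range'_concat, List.reverse_append, List.reverse_singleton]
    simp only [List.singleton_append, pvOuterA, Nat.one_mul]
    rw [Nat.add_comm 1 j₀]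
    rw [pv_getD_eq cs (j₀ + 1) hjcs]
    have hstep := pv_step_counts_cons cs[(j₀ + 1)] a b c (cs.drop (j₀ + 1 + 1)) ha hb hc
    rw [← pv_drop_eq_cons cs (j₀ + 1) hjcs] at hstep
    rw [hstep, List.range_eq_range']
    have hinner := pv_inner_post cs k n (j₀ + 1) (j₀ + 1) 0
      (pvCntA (cs.drop (j₀ + 1))) (pvCntB (cs.drop (j₀ + 1))) (pvCntC (cs.drop (j₀ + 1))) answer
      (by omega) (by omega) hn
      (by simp [pvCntA]) (by simp [pvCntB]) (by simp [pvCntC])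
    obtain ⟨I1, I2, I3⟩ := hinner
    set answer' := pvInnerA cs k n (j₀ + 1) (List.range' 0 (j₀ + 1))
      (pvCntA (cs.drop (j₀ + 1))) (pvCntB (cs.drop (j₀ + 1))) (pvCntC (cs.drop (j₀ + 1))) answer
      with hanswer'
    obtain ⟨ih1, ih2, ih3⟩ := ih (pvCntA (cs.drop (j₀ + 1))) (pvCntB (cs.drop (j₀ + 1)))
      (pvCntC (cs.drop (j₀ + 1))) answer' (by omega) rfl rfl rfl
    refine ⟨le_trans ih1 I1, ?_, ?_⟩
    · intro l j hj1 hj2 hl1 hl2 hv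
      rcases Nat.lt_or_ge j₀ j with hj | hj
      · have hjeq : j = j₀ + 1 := by omega
        subst hjeq
        exact le_trans ih1 (I2 l (by omega) (by omega) hv)
      · exact ih2 l j hj1 hj hl1 hl2 hv
    · rcases ih3 with h | ⟨l, j, hj1, hj2, hl1, hl2, hv, heq⟩
      · rw [h]
        rcases I3 with h2 | ⟨l, hl1, hl2, hv, heq⟩
        · exact Or.inl h2
        · exact Or.inr ⟨l, j₀ + 1, by omega, by omega, by omega, by omega, hv, heq⟩
      · exact Or.inr ⟨l, j, hj1, by omega, hl1, hl2, hv, heq⟩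

-- slice of cs between x and r
def pvSlice (cs : List Char) (x r : Nat) : List Char := (cs.take r).drop x

theorem pv_slice_length (cs : List Char) (x r : Nat) (hr : r ≤ cs.length) :
    (pvSlice cs x r).length = r - x := by
  unfold pvSlice
  rw [List.length_drop, List.length_take]
  omega

theorem pv_slice_cons (cs : List Char) (x r : Nat) (hxr : x < r) (hr : r ≤ cs.length) :
    pvSlice cs x r = cs[x]'(by omega) :: pvSlice cs (x + 1) r := by
  unfold pvSlice
  rw [List.drop_eq_getElem_cons (by rw [List.length_take]; omega)]
  congr 1
  exact List.getElem_take

-- cs splits as take x ++ slice x r ++ drop r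
theorem pv_slice_decomp (cs : List Char) (x r : Nat) (hxr : x ≤ r) :
    cs = cs.take x ++ (pvSlice cs x r ++ cs.drop r) := by
  unfold pvSlice
  conv_lhs => rw [← List.take_append_drop r cs, ← List.take_append_drop x (cs.take r)]
  rw [List.take_take, min_eq_left hxr, List.append_assoc]

theorem pv_outside_counts (cs : List Char) (x r : Nat) (hxr : x ≤ r) :
    pvCntA cs - pvCntA (pvSlice cs x r) = pvCntA (cs.take x) + pvCntA (cs.drop r) ∧
    pvCntB cs - pvCntB (pvSlice cs x r) = pvCntB (cs.take x) + pvCntB (cs.drop r) ∧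
    pvCntC cs - pvCntC (pvSlice cs x r) = pvCntC (cs.take x) + pvCntC (cs.drop r) := by
  obtain ⟨a1, b1, c1⟩ := pv_cnt_append (cs.take x) (pvSlice cs x r ++ cs.drop r)
  obtain ⟨a2, b2, c2⟩ := pv_cnt_append (pvSlice cs x r) (cs.drop r)
  rw [a2] at a1; rw [b2] at b1; rw [c2] at c1
  rw [← pv_slice_decomp cs x r hxr] at a1 b1 c1
  refine ⟨by omega, by omega, by omega⟩

-- one-character decrement, cons form
theorem pv_unstep_counts_cons (ch : Char) (wa wb wc : Int) (suf : List Char)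
    (ha : wa = pvCntA (ch :: suf)) (hb : wb = pvCntB (ch :: suf)) (hc : wc = pvCntC (ch :: suf)) :
    (if ch = 'a' then (wa - 1, wb, wc)
     else if ch = 'b' then (wa, wb - 1, wc)
     else (wa, wb, wc - 1) : Int × Int × Int)
    = (pvCntA suf, pvCntB suf, pvCntC suf) := by
  subst ha hb hc
  unfold pvCntA pvCntB pvCntC
  by_cases h1 : ch = 'a' <;> by_cases h2 : ch = 'b' <;>
    simp_all [Prod.ext_iff, List.countP_cons] <;> omega

theorem pv_shrink_post (cs : List Char) (k ta tb tc : Int)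
    (hta : ta = pvCntA cs) (htb : tb = pvCntB cs) (htc : tc = pvCntC cs)
    (hf : k ≤ pvCntA cs ∧ k ≤ pvCntB cs ∧ k ≤ pvCntC cs) :
    ∀ (win : List Char) (x r : Nat) (wa wb wc : Int),
      x ≤ r → r ≤ cs.length → win = pvSlice cs x r →
      wa = pvCntA win → wb = pvCntB win → wc = pvCntC win →
      ∃ x₂, x ≤ x₂ ∧ x₂ ≤ r ∧
        pvShrinkB k ta tb tc win wa wb wc =
          (pvSlice cs x₂ r, pvCntA (pvSlice cs x₂ r), pvCntB (pvSlice cs x₂ r), pvCntC (pvSlice cs x₂ r)) ∧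
        pvValid cs k x₂ r ∧ (∀ x' , x ≤ x' → x' < x₂ → ¬ pvValid cs k x' r) := by
  intro win
  induction win with
  | nil =>
    intro x r wa wb wc hxr hr hwin hwa hwb hwc
    have hx : x = r := by
      have := pv_slice_length cs x r hr
      rw [← hwin] at this
      simp at this
      omega
    subst hx
    refine ⟨x, le_refl _, le_refl _, ?_, pv_valid_refl cs k x hf, ?_⟩
    · simp only [pvShrinkB]
      rw [← hwin, hwa, hwb, hwc, hwin]
    · intro x' h1 h2
      omega
  | cons lc rest ih =>
    intro x r wa wb wc hxr hr hwin hwa hwb hwc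
    have hxr' : x < r := by
      by_contra h
      have hx : x = r := by omega
      subst hx
      have := pv_slice_length cs x x hr
      rw [← hwin] at this
      simp at this
    have h2 := hwin.trans (pv_slice_cons cs x r hxr' hr)
    have hlc : lc = cs[x]'(by omega) := by injection h2
    have hrest : rest = pvSlice cs (x + 1) r := by injection h2
    obtain ⟨hout1, hout2, hout3⟩ := pv_outside_counts cs x r (by omega)
    rw [← hwin] at hout1 hout2 hout3
    simp only [pvShrinkB]
    by_cases hcond : ta - wa < k ∨ tb - wb < k ∨ tc - wc < k
    · rw [if_pos hcond]
      have hnv : ¬ pvValid cs k x r := by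
        intro hv
        obtain ⟨v1, v2, v3⟩ := hv
        rw [hta, htb, htc, hwa, hwb, hwc] at hcond
        omega
      have hun := pv_unstep_counts_cons lc wa wb wc rest hwa hwb hwc
      rw [hun]
      obtain ⟨x₂, hx1, hx2, hx3, hx4, hx5⟩ := ih (x + 1) r (pvCntA rest) (pvCntB rest)
        (pvCntC rest) (by omega) hr hrest rfl rfl rfl
      refine ⟨x₂, by omega, hx2, hx3, hx4, ?_⟩
      intro x' h1 h2
      rcases Nat.eq_or_lt_of_le h1 with h | h
      · rw [← h]; exact hnv
      · exact hx5 x' h h2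
    · rw [if_neg hcond]
      have hv : pvValid cs k x r := by
        push_neg at hcond
        rw [hta, htb, htc, hwa, hwb, hwc] at hcond
        refine ⟨by omega, by omega, by omega⟩
      exact ⟨x, le_refl _, by omega, by rw [← hwin, hwa, hwb, hwc], hv, fun x' h1 h2 => by omega⟩

theorem pv_slice_snoc (cs : List Char) (x r : Nat) (hx : x ≤ r) (hr : r < cs.length) :
    pvSlice cs x r ++ [cs[r]] = pvSlice cs x (r + 1) := by
  unfold pvSlice
  rw [pv_take_succ_eq cs r hr, List.drop_append_of_le_length (by rw [List.length_take]; omega)]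

-- one-character increment at the end of the window
theorem pv_step_counts_snoc (ch : Char) (wa wb wc : Int) (pre : List Char)
    (ha : wa = pvCntA pre) (hb : wb = pvCntB pre) (hc : wc = pvCntC pre) :
    (if ch = 'a' then (wa + 1, wb, wc)
     else if ch = 'b' then (wa, wb + 1, wc)
     else (wa, wb, wc + 1) : Int × Int × Int)
    = (pvCntA (pre ++ [ch]), pvCntB (pre ++ [ch]), pvCntC (pre ++ [ch])) := by
  obtain ⟨e1, e2, e3⟩ := pv_cnt_append pre [ch]
  obtain ⟨s1, s2, s3⟩ := pv_cnt_single ch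
  subst ha hb hc
  by_cases h1 : ch = 'a' <;> by_cases h2 : ch = 'b' <;>
    simp_all [Prod.ext_iff] <;> omega

theorem pv_loopB_post (cs : List Char) (k ta tb tc : Int)
    (hta : ta = pvCntA cs) (htb : tb = pvCntB cs) (htc : tc = pvCntC cs)
    (hf : k ≤ pvCntA cs ∧ k ≤ pvCntB cs ∧ k ≤ pvCntC cs) :
    ∀ (rest win : List Char) (x r : Nat) (wa wb wc best : Int),
      r + rest.length = cs.length → rest = cs.drop r → x ≤ r →
      win = pvSlice cs x r → wa = pvCntA win → wb = pvCntB win → wc = pvCntC win →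
      pvValid cs k x r → (∀ x', x' < x → ¬ pvValid cs k x' r) →
      (∀ x' y, x' ≤ y → y ≤ r → pvValid cs k x' y → ((y - x' : Nat) : Int) ≤ best) →
      (best = 0 ∨ ∃ x' y, x' ≤ y ∧ y ≤ r ∧ pvValid cs k x' y ∧ best = ((y - x' : Nat) : Int)) →
      (∀ x' y, x' ≤ y → y ≤ cs.length → pvValid cs k x' y →
        ((y - x' : Nat) : Int) ≤ pvLoopB k ta tb tc rest win wa wb wc best) ∧
      (pvLoopB k ta tb tc rest win wa wb wc best = 0 ∨
        ∃ x' y, x' ≤ y ∧ y ≤ cs.length ∧ pvValid cs k x' y ∧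
          pvLoopB k ta tb tc rest win wa wb wc best = ((y - x' : Nat) : Int)) := by
  intro rest
  induction rest with
  | nil =>
    intro win x r wa wb wc best hlen hrest hxr hwin hwa hwb hwc hv hleast hB1 hB2
    have hrn : r = cs.length := by simp at hlen; omega
    simp only [pvLoopB]
    subst hrn
    exact ⟨fun x' y h1 h2 h3 => hB1 x' y h1 h2 h3, hB2⟩
  | cons ch rest' ih =>
    intro win x r wa wb wc best hlen hrest hxr hwin hwa hwb hwc hv hleast hB1 hB2
    have hr : r < cs.length := by simp at hlen; omega
    have hdropr := pv_drop_eq_cons cs r hr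
    rw [hdropr] at hrest
    obtain ⟨hch, hrest'⟩ : ch = cs[r] ∧ rest' = cs.drop (r + 1) := by
      injection hrest with h1 h2
      exact ⟨h1, h2⟩
    simp only [pvLoopB]
    have hstep := pv_step_counts_snoc ch wa wb wc win hwa hwb hwc
    rw [hstep]
    have hwin1 : win ++ [ch] = pvSlice cs x (r + 1) := by
      rw [hwin, hch]
      exact pv_slice_snoc cs x r hxr hr
    obtain ⟨x₂, hx21, hx22, hx23, hx24, hx25⟩ := pv_shrink_post cs k ta tb tc hta htb htc hf
      (win ++ [ch]) x (r + 1) (pvCntA (win ++ [ch])) (pvCntB (win ++ [ch]))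
      (pvCntC (win ++ [ch])) (by omega) (by omega) hwin1 rfl rfl rfl
    rw [hx23]
    have hleast2 : ∀ x', x' < x₂ → ¬ pvValid cs k x' (r + 1) := by
      intro x' hx' hv'
      rcases Nat.lt_or_ge x' x with h | h
      · exact hleast x' h (pv_valid_anti_y cs k (by omega) hv')
      · exact hx25 x' h hx' hv'
    have hslen : (pvSlice cs x₂ (r + 1)).length = r + 1 - x₂ :=
      pv_slice_length cs x₂ (r + 1) (by omega)
    obtain ⟨P1, P2⟩ := ih (pvSlice cs x₂ (r + 1)) x₂ (r + 1)
      (pvCntA (pvSlice cs x₂ (r + 1))) (pvCntB (pvSlice cs x₂ (r + 1)))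
      (pvCntC (pvSlice cs x₂ (r + 1)))
      (max best ((pvSlice cs x₂ (r + 1)).length : Int))
      (by simp at hlen ⊢; omega) hrest' hx22 rfl rfl rfl rfl hx24 hleast2
      (by
        intro x' y h1 h2 h3
        rcases Nat.lt_or_ge y (r + 1) with h | h
        · exact le_trans (hB1 x' y h1 (by omega) h3) (le_max_left _ _)
        · have hy : y = r + 1 := by omega
          subst hy
          have hxx : x₂ ≤ x' := by
            by_contra hc2
            exact hleast2 x' (by omega) h3
          rw [hslen]
          refine le_trans ?_ (le_max_right _ _)
          have hcast : r + 1 - x' ≤ r + 1 - x₂ := by omega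
          exact_mod_cast hcast)
      (by
        rcases le_total best ((pvSlice cs x₂ (r + 1)).length : Int) with h | h
        · right
          exact ⟨x₂, r + 1, hx22, le_refl _, hx24, by rw [max_eq_right h, hslen]⟩
        · rcases hB2 with h2 | ⟨x', y, hy1, hy2, hy3, hy4⟩
          · left; rw [max_eq_left h, h2]
          · right; exact ⟨x', y, hy1, by omega, hy3, by rw [max_eq_left h, hy4]⟩)
    exact ⟨P1, P2⟩

-- characterization of A on feasible inputs with k ≠ 0
theorem pv_A_char (s : String) (k : Int) (hk : 1 ≤ k)
    (hf : k ≤ pvCntA s.toList ∧ k ≤ pvCntB s.toList ∧ k ≤ pvCntC s.toList) :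
    (takeCharacters_brute s k ≤ (s.toList.length : Int)) ∧
    (∀ l r, 1 ≤ l → 1 ≤ r → pvOk s.toList k l r →
      takeCharacters_brute s k ≤ ((l + r : Nat) : Int)) ∧
    (takeCharacters_brute s k = (s.toList.length : Int) ∨
      ∃ l r, 1 ≤ l ∧ 1 ≤ r ∧ pvOk s.toList k l r ∧
        takeCharacters_brute s k = ((l + r : Nat) : Int)) := by
  set cs := s.toList with hcs
  have hn1 : 1 ≤ cs.length := by
    by_contra h
    have hnil : cs = [] := List.length_eq_zero_iff.mp (by omega)
    rw [hnil] at hf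
    simp [pvCntA] at hf
    omega
  have hA : takeCharacters_brute s k =
      pvOuterA cs k cs.length ((List.range' 1 (cs.length - 1)).reverse) 0 0 0 (cs.length : Int) := by
    unfold takeCharacters_brute
    rw [if_neg (by omega)]
    simp only [← hcs, pv_countABC_eq]
    rw [if_neg (by push_neg; exact ⟨by omega, by omega, by omega⟩)]
  obtain ⟨O1, O2, O3⟩ := pv_outer_post cs k cs.length rfl (cs.length - 1)
    0 0 0 (cs.length : Int) (by omega)
    (by rw [show cs.length - 1 + 1 = cs.length by omega, List.drop_length]; simp [pvCntA])
    (by rw [show cs.length - 1 + 1 = cs.length by omega, List.drop_length]; simp [pvCntB])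
    (by rw [show cs.length - 1 + 1 = cs.length by omega, List.drop_length]; simp [pvCntC])
  rw [← hA] at O1 O2 O3
  refine ⟨O1, ?_, ?_⟩
  · intro l r hl hr hok
    obtain ⟨hlr, hval⟩ := hok
    have hle := O2 l (cs.length - r) (by omega) (by omega) hl (by omega) hval
    calc takeCharacters_brute s k
        ≤ (l : Int) + (cs.length : Int) - ((cs.length - r : Nat) : Int) := hle
      _ = ((l + r : Nat) : Int) := by push_cast; omega
  · rcases O3 with h | ⟨l, j, hj1, hj2, hl1, hl2, hval, heq⟩
    · exact Or.inl h
    · refine Or.inr ⟨l, cs.length - j, hl1, by omega, ⟨by omega, ?_⟩, ?_⟩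
      · rw [show cs.length - (cs.length - j) = j by omega]
        exact hval
      · rw [heq]; push_cast; omega

-- characterization of B on feasible inputs with k ≥ 1
theorem pv_B_char (s : String) (k : Int) (hk : 1 ≤ k)
    (hf : k ≤ pvCntA s.toList ∧ k ≤ pvCntB s.toList ∧ k ≤ pvCntC s.toList) :
    (∀ l r, pvOk s.toList k l r →
      takeCharacters_brute_alt s k ≤ ((l + r : Nat) : Int)) ∧
    (∃ l r, pvOk s.toList k l r ∧
      takeCharacters_brute_alt s k = ((l + r : Nat) : Int)) := by
  set cs := s.toList with hcs
  have hB : takeCharacters_brute_alt s k =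
      (cs.length : Int) - pvLoopB k (pvCntA cs) (pvCntB cs) (pvCntC cs) cs [] 0 0 0 0 := by
    unfold takeCharacters_brute_alt
    rw [if_neg (by omega)]
    simp only [← hcs, pv_totB_eq]
    rw [if_neg (by push_neg; exact ⟨by omega, by omega, by omega⟩)]
  obtain ⟨P1, P2⟩ := pv_loopB_post cs k (pvCntA cs) (pvCntB cs) (pvCntC cs) rfl rfl rfl hf
    cs [] 0 0 0 0 0 0 (by simp) (by simp) (le_refl _) (by simp [pvSlice])
    (by simp [pvCntA]) (by simp [pvCntB]) (by simp [pvCntC])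
    (pv_valid_refl cs k 0 hf) (by omega)
    (by intro x' y h1 h2 h3
        have hy0 : y - x' = 0 := by omega
        rw [hy0]; simp)
    (Or.inl rfl)
  constructor
  · intro l r hok
    obtain ⟨hlr, hval⟩ := hok
    have hle := P1 l (cs.length - r) (by omega) (by omega) hval
    rw [hB]
    have hc : ((cs.length - r - l : Nat) : Int) ≤ pvLoopB k (pvCntA cs) (pvCntB cs) (pvCntC cs) cs [] 0 0 0 0 := hle
    push_cast at hc ⊢
    omega
  · rcases P2 with h | ⟨x', y, hy1, hy2, hval, heq⟩
    · refine ⟨cs.length, 0, ⟨by omega, ?_⟩, by rw [hB, h]; push_cast; omega⟩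
      exact pv_valid_refl cs k cs.length hf
    · refine ⟨x', cs.length - y, ⟨by omega, ?_⟩, ?_⟩
      · rw [show cs.length - (cs.length - y) = y by omega]
        exact hval
      · rw [hB, heq]; push_cast; omega

-- the whole string is always a feasible take on feasible inputs
theorem pv_ok_full (cs : List Char) (k : Int)
    (hf : k ≤ pvCntA cs ∧ k ≤ pvCntB cs ∧ k ≤ pvCntC cs) :
    pvOk cs k cs.length 0 :=
  ⟨by omega, pv_valid_refl cs k cs.length hf⟩

-- both ports return -1 on infeasible inputs with k ≥ 1
theorem pv_infeasible (s : String) (k : Int) (hk : 1 ≤ k)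
    (hnf : ¬ (k ≤ pvCntA s.toList ∧ k ≤ pvCntB s.toList ∧ k ≤ pvCntC s.toList)) :
    takeCharacters_brute s k = -1 ∧ takeCharacters_brute_alt s k = -1 := by
  have hlt : pvCntA s.toList < k ∨ pvCntB s.toList < k ∨ pvCntC s.toList < k := by
    by_contra h
    push_neg at h
    exact hnf ⟨by omega, by omega, by omega⟩
  constructor
  · unfold takeCharacters_brute
    rw [if_neg (by omega)]
    simp only [pv_countABC_eq]
    rw [if_pos hlt]
  · unfold takeCharacters_brute_alt
    rw [if_neg (by omega)]
    simp only [pv_totB_eq]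
    rw [if_pos hlt]

-- ===== VERDICT (by name: the statement is the Claim_ definition above) =====
theorem takeCharacters_brute_spec : Claim_unchanged_takeCharacters_brute := by
  intro s k hdom hpre
  unfold Spec_takeCharacters_brute
  intro hnd
  have hk0 : 0 ≤ k := hpre
  by_cases hk : k = 0
  · simp [takeCharacters_brute, takeCharacters_brute_alt, hk]
  · have hk1 : 1 ≤ k := by omega
    by_cases hfeas : k ≤ pvCntA s.toList ∧ k ≤ pvCntB s.toList ∧ k ≤ pvCntC s.toList
    · obtain ⟨A1, A2, A3⟩ := pv_A_char s k hk1 hfeas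
      obtain ⟨BU, BL⟩ := pv_B_char s k hk1 hfeas
      have hBA : takeCharacters_brute_alt s k ≤ takeCharacters_brute s k := by
        rcases A3 with h | ⟨l, r, hl, hr, hok, heq⟩
        · rw [h]
          have hb := BU s.toList.length 0 (pv_ok_full s.toList k hfeas)
          push_cast at hb
          omega
        · rw [heq]
          exact BU l r hok
      have hAB : takeCharacters_brute s k ≤ takeCharacters_brute_alt s k := by
        obtain ⟨l, r, hok, hBeq⟩ := BL
        by_cases htwo : 1 ≤ l ∧ 1 ≤ r
        · rw [hBeq]
          exact A2 l r htwo.1 htwo.2 hok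
        · rcases Nat.lt_or_ge (l + r) s.toList.length with hcn | hcn
          · by_contra hgt
            push_neg at hgt
            apply hnd
            refine ⟨hk1, hfeas.1, hfeas.2.1, hfeas.2.2, l + r, hcn, ?_, ?_⟩
            · rcases not_and_or.mp htwo with h | h
              · have hl0 : l = 0 := by omega
                refine Or.inr ?_
                rw [show l + r = r by omega, ← hl0]
                exact hok
              · have hr0 : r = 0 := by omega
                refine Or.inl ?_
                rw [show l + r = l by omega, ← hr0]
                exact hok
            · intro l' hl' r' hr' hcontra
              obtain ⟨h1, h2, h3, h4⟩ := hcontra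
              have hA2 := A2 l' r' h1 h2 h4
              rw [hBeq] at hgt
              have hmono : ((l' + r' : Nat) : Int) ≤ ((l + r : Nat) : Int) := by
                exact_mod_cast h3
              omega
          · rw [hBeq]
            have : ((s.toList.length : Nat) : Int) ≤ ((l + r : Nat) : Int) := by
              exact_mod_cast hcn
            omega
      omega
    · obtain ⟨hA, hB⟩ := pv_infeasible s k hk1 hfeas
      rw [hA, hB]

theorem takeCharacters_brute_changed : Claim_changed_takeCharacters_brute := by
  unfold Claim_changed_takeCharacters_brute; decide

theorem takeCharacters_brute_tight : Claim_exact_takeCharacters_brute := by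
  intro s k hdom hpre hd
  obtain ⟨hk1, hfa, hfb, hfc, c, hcn, hone, hall⟩ := hd
  have hfeas : k ≤ pvCntA s.toList ∧ k ≤ pvCntB s.toList ∧ k ≤ pvCntC s.toList := ⟨hfa, hfb, hfc⟩
  obtain ⟨A1, A2, A3⟩ := pv_A_char s k hk1 hfeas
  obtain ⟨BU, BL⟩ := pv_B_char s k hk1 hfeas
  have hBle : takeCharacters_brute_alt s k ≤ (c : Int) := by
    rcases hone with h | h
    · have := BU c 0 h
      push_cast at this
      omega
    · have := BU 0 c h
      push_cast at this
      omega
  have hAgt : (c : Int) < takeCharacters_brute s k := by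
    rcases A3 with h | ⟨l, r, hl, hr, hok, heq⟩
    · rw [h]
      exact_mod_cast hcn
    · rw [heq]
      have hlt : c < l + r := by
        by_contra hle
        push_neg at hle
        exact hall l (by omega) r (by omega) ⟨hl, hr, hle, hok⟩
      exact_mod_cast hlt
  omega
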